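-- pv_equiv track=rewrite | github.com/sungrokgi/coding_python | 프로그래머스/unrated/142085. 디펜스 게임/디펜스 게임.py | solution
-- ===== SOURCE A (Python) =====
-- import heapq
--
-- def solution(n, k, enemy):
--     e = 0
--     h = []
--     if k >= len(enemy):
--         return len(enemy)
--     for i in range(len(enemy)):
--         heapq.heappush(h,-enemy[i])
--         e+= enemy[i]
--         if e>n:
--             if k==0:
--                 return i
--             e -= (-heapq.heappop(h))
--             k-=1
--
--     return i+1
-- ===== SOURCE B (Python) =====
-- def solution(n, k, enemy):
--     L = len(enemy)
--     if k >= L: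
--         return L
--     dropped = []  # values already cancelled by a free pass (multiset)
--     for i in range(L):
--         hp = sum(enemy[:i + 1]) - sum(dropped)
--         if hp > n:
--             if len(dropped) == k:
--                 return i
--             pool = list(enemy[:i + 1])
--             for d in dropped:
--                 pool.remove(d)
--             dropped.append(max(pool))
--     return L
-- ===== Notes on version B (the rewrite author's own statement) =====
-- stated objective: alternative
-- what changed: B replaces A's running heap-and-accumulator sweep by a stateless per-round recomputation: it keeps only the multiset of cancelled values, recomputes the remaining damage as prefix-sum minus cancelled-sum each round, and on overflow rebuilds the surviving pool by multiset subtraction and cancels its maximum (no heap, no running total).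
import Mathlib
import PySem

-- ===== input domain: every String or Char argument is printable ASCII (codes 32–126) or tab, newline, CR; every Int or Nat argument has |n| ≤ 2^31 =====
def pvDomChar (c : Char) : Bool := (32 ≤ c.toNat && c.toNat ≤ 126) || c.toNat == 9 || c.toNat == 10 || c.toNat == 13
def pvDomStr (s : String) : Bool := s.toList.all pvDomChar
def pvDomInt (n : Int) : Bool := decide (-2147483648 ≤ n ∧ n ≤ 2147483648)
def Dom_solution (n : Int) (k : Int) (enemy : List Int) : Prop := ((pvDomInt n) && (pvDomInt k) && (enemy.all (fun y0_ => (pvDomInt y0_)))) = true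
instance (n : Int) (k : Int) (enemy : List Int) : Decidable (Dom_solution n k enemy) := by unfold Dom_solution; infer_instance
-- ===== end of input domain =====

-- B replaces A's heap-and-running-total greedy sweep by a stateless per-round recomputation
-- over the cancelled-values multiset (same return value; A raises only on empty enemy with k < 0).


-- ===== PORT A =====
-- The heapq heap stores negated values and is observed ONLY through heappush (insert) and
-- heappop (remove and return the minimum VALUE); over Int the popped value and the remaining
-- multiset never depend on the heap's internal array order, so the heap is modelled exactly
-- as a list used as a multiset: push = append, pop = remove the first minimal element.
def pyHeapPush (h : List Int) (x : Int) : List Int := h ++ [x]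

def pyHeapPop (h : List Int) : Int × List Int :=
  match PySem.List.min? h (fun y => y) with
  | some m => (m, (PySem.List.remove? h m).getD h)
  | none => (0, h)  -- unreachable: A pops only right after a push, so h ≠ []

-- for i in range(len(enemy)): … ; after the loop 'return i+1' with i = len-1, i.e. len(enemy)
def solutionLoop (n : Int) (enemy : List Int) : List Nat → Int → List Int → Int → Int
  | [], _, _, _ => (enemy.length : Int)
  | i :: rest, e, h, k =>
    let x := (PySem.List.pyGet? enemy (i : Int)).getD 0  -- enemy[i]; i ∈ range(len): in range
    let h1 := pyHeapPush h (-x)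
    let e1 := e + x
    if e1 > n then
      if k = 0 then (i : Int)
      else
        let p := pyHeapPop h1
        solutionLoop n enemy rest (e1 - (-p.1)) p.2 (k - 1)
    else
      solutionLoop n enemy rest e1 h1 k

def solution (n : Int) (k : Int) (enemy : List Int) : Int :=
  if k ≥ (enemy.length : Int) then (enemy.length : Int)
  else solutionLoop n enemy (List.range enemy.length) 0 [] k

-- ===== PORT B =====
-- pool.remove(d): in B every d ∈ dropped still occurs in the pool being reduced, so the
-- remove always succeeds; getD only keeps the function total on the unreachable none case.
def dropAll (pre : List Int) (dropped : List Int) : List Int :=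
  dropped.foldl (fun p d => (PySem.List.remove? p d).getD p) pre

def solutionAltLoop (n : Int) (k : Int) (enemy : List Int) : List Nat → List Int → Int
  | [], _ => (enemy.length : Int)
  | i :: rest, dropped =>
    let pre := PySem.List.slice enemy none (some ((i : Int) + 1))  -- enemy[:i+1]
    let hp := pre.sum - dropped.sum
    if hp > n then
      if (dropped.length : Int) = k then (i : Int)
      else
        let pool := dropAll pre dropped
        solutionAltLoop n k enemy rest
          (dropped ++ [(PySem.List.max? pool (fun y => y)).getD 0])  -- max(pool): pool ≠ []
    else
      solutionAltLoop n k enemy rest dropped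

def solution_alt (n : Int) (k : Int) (enemy : List Int) : Int :=
  if k ≥ (enemy.length : Int) then (enemy.length : Int)
  else solutionAltLoop n k enemy (List.range enemy.length) []

-- ===== PRECONDITION & SPEC =====
-- Pre_ excludes only empty enemy with k < 0, where A's loop never runs and its 'return i+1'
-- raises UnboundLocalError.
def Pre_solution (n : Int) (k : Int) (enemy : List Int) : Prop := enemy ≠ [] ∨ 0 ≤ k
instance (n : Int) (k : Int) (enemy : List Int) : Decidable (Pre_solution n k enemy) := by unfold Pre_solution; infer_instance
def pvWitness_solution : Int × Int × List Int := (5, 1, [4, 2, 4, 8, 3, 3, 1])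

def Spec_solution (n : Int) (k : Int) (enemy : List Int) (out : Int) : Prop := out = solution_alt n k enemy
instance (n : Int) (k : Int) (enemy : List Int) (out : Int) : Decidable (Spec_solution n k enemy out) := by unfold Spec_solution; infer_instance

-- ===== CLAIM (what is proved, stated in full; the proofs are below) =====
def Claim_equal_solution : Prop := ∀ (n : Int) (k : Int) (enemy : List Int), Dom_solution n k enemy → Pre_solution n k enemy → Spec_solution n k enemy (solution n k enemy)


-- ===== LEMMAS AND PROOFS =====

lemma add_single_le {P D : Multiset Int} {a : Int} (hle : D ≤ P) (ha : a ∈ P - D) :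
    D + {a} ≤ P := by
  rw [Multiset.le_iff_count]
  intro b
  have h1 := (Multiset.le_iff_count.mp hle) b
  have h2 : 0 < Multiset.count a (P - D) := Multiset.count_pos.mpr ha
  rw [Multiset.count_sub] at h2
  by_cases hb : b = a
  · subst hb
    simp [Multiset.count_add]
    omega
  · simp [Multiset.count_add, hb]
    omega

lemma dropAll_coe :
    ∀ (dropped pre : List Int), (↑dropped : Multiset Int) ≤ ↑pre →
      (↑(dropAll pre dropped) : Multiset Int) = ↑pre - ↑dropped
  | [], pre, _ => by simp [dropAll]
  | d :: ds, pre, hle => by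
    have hmem : d ∈ pre := by
      have : d ∈ (↑pre : Multiset Int) := Multiset.mem_of_le hle (by simp)
      simpa using this
    have hstep : dropAll pre (d :: ds) = dropAll (pre.erase d) ds := by
      simp [dropAll, PySem.List.remove?_eq_some_erase pre d hmem]
    have hle' : (↑ds : Multiset Int) ≤ ↑(pre.erase d) := by
      have := Multiset.erase_le_erase d hle
      simpa [Multiset.coe_erase] using this
    rw [hstep, dropAll_coe ds (pre.erase d) hle']
    rw [← Multiset.coe_erase, ← Multiset.sub_singleton, tsub_tsub]
    simp [Multiset.singleton_add]

lemma max_of_neg_min {h1 pool : List Int} {m : Int}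
    (hms : (↑(h1.map (fun y => -y)) : Multiset Int) = ↑pool)
    (hmin : PySem.List.min? h1 (fun y => y) = some m) :
    PySem.List.max? pool (fun y => y) = some (-m) := by
  have hmemiff : ∀ a : Int, a ∈ pool ↔ a ∈ h1.map (fun y => -y) := by
    intro a
    constructor <;> intro hx
    · have : a ∈ (↑(h1.map (fun y => -y)) : Multiset Int) := by rw [hms]; simpa using hx
      simpa using this
    · have : a ∈ (↑pool : Multiset Int) := by rw [← hms]; simpa using hx
      simpa using this
  have hmmem : m ∈ h1 := PySem.List.min?_mem hmin
  have hnm : -m ∈ pool := (hmemiff (-m)).mpr (by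
    exact List.mem_map.mpr ⟨m, hmmem, rfl⟩)
  cases hM : PySem.List.max? pool (fun y => y) with
  | none =>
    rw [PySem.List.max?_eq_none_iff] at hM
    subst hM
    simp at hnm
  | some M =>
    have hMmem : M ∈ pool := PySem.List.max?_mem hM
    obtain ⟨y, hy, hyM⟩ := List.mem_map.mp ((hmemiff M).mp hMmem)
    have h1' : m ≤ y := PySem.List.min?_isMin hmin y hy
    have h2' : -m ≤ M := PySem.List.max?_isMax hM (-m) hnm
    have : M = -m := by omega
    rw [this]

lemma coe_append_single (l : List Int) (x : Int) :
    (↑(l ++ [x]) : Multiset Int) = ↑l + {x} := by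
  rw [← Multiset.coe_add]; rfl

lemma loop_eq (n k : Int) (enemy : List Int) :
    ∀ (m i : Nat) (e : Int) (h dropped : List Int),
    i + m = enemy.length →
    e = (enemy.take i).sum - dropped.sum →
    (↑dropped : Multiset Int) ≤ ↑(enemy.take i) →
    (↑(h.map (fun y => -y)) : Multiset Int) = ↑(enemy.take i) - ↑dropped →
    solutionLoop n enemy (List.range' i m) e h (k - dropped.length)
      = solutionAltLoop n k enemy (List.range' i m) dropped := by
  intro m
  induction m with
  | zero => intro i e h dropped _ _ _ _; rfl
  | succ m ih =>
    intro i e h dropped hlen he hdle hh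
    have hilt : i < enemy.length := by omega
    rw [List.range'_succ]
    simp only [solutionLoop, solutionAltLoop]
    -- enemy[i]
    have hx : (PySem.List.pyGet? enemy ((i : Nat) : Int)).getD 0 = enemy[i] := by
      rw [PySem.List.pyGet?_natCast, List.getElem?_eq_getElem hilt]
      rfl
    -- enemy[:i+1] = take (i+1)
    have hpre : PySem.List.slice enemy none (some ((i : Int) + 1)) = enemy.take (i + 1) := by
      have : ((i : Int) + 1) = ((i + 1 : Nat) : Int) := by push_cast; ring
      rw [this, PySem.List.slice_to_natCast]
    have hsum : (enemy.take (i + 1)).sum = (enemy.take i).sum + enemy[i] :=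
      List.sum_take_succ enemy i hilt
    have htake : (↑(enemy.take (i + 1)) : Multiset Int)
        = ↑(enemy.take i) + {enemy[i]} := by
      have h1 : enemy.take (i + 1) = enemy.take i ++ [enemy[i]] := by
        rw [List.take_add_one, List.getElem?_eq_getElem hilt]
        rfl
      rw [h1, coe_append_single]
    have hdle' : (↑dropped : Multiset Int) ≤ ↑(enemy.take (i + 1)) := by
      rw [htake]; exact le_trans hdle (Multiset.le_add_right _ _)
    have hmap1 : (↑((pyHeapPush h (-enemy[i])).map (fun y => -y)) : Multiset Int)
        = ↑(enemy.take (i + 1)) - ↑dropped := by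
      simp only [pyHeapPush, List.map_append, List.map_cons, List.map_nil, neg_neg]
      rw [coe_append_single, hh, htake, tsub_add_eq_add_tsub hdle]
    rw [hx, hpre]
    -- the two overflow tests coincide
    have hcond : (enemy.take (i + 1)).sum - dropped.sum = e + enemy[i] := by
      rw [hsum, he]; ring
    rw [hcond]
    -- the two pass-exhaustion tests coincide
    have hkcond : ((dropped.length : Int) = k) = (k - (dropped.length : Int) = 0) :=
      propext ⟨fun hq => by omega, fun hq => by omega⟩
    simp only [hkcond]
    by_cases hov : e + enemy[i] > n
    · rw [if_pos hov, if_pos hov]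
      by_cases hk0 : k - (dropped.length : Int) = 0
      · rw [if_pos hk0, if_pos hk0]
      · rw [if_neg hk0, if_neg hk0]
        -- A pops the heap minimum; B cancels the pool maximum: the same value
        have hne : pyHeapPush h (-enemy[i]) ≠ [] := by simp [pyHeapPush]
        obtain ⟨mv, hmv⟩ :
            ∃ mv, PySem.List.min? (pyHeapPush h (-enemy[i])) (fun y => y) = some mv := by
          cases hc : PySem.List.min? (pyHeapPush h (-enemy[i])) (fun y => y) with
          | none => exact absurd ((PySem.List.min?_eq_none_iff _ _).mp hc) hne
          | some mv => exact ⟨mv, rfl⟩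
        have hmvmem : mv ∈ pyHeapPush h (-enemy[i]) := PySem.List.min?_mem hmv
        have hpop : pyHeapPop (pyHeapPush h (-enemy[i]))
            = (mv, (pyHeapPush h (-enemy[i])).erase mv) := by
          rw [pyHeapPop, hmv]
          simp [PySem.List.remove?_eq_some_erase _ mv hmvmem]
        have hpool : (↑(dropAll (enemy.take (i + 1)) dropped) : Multiset Int)
            = ↑((pyHeapPush h (-enemy[i])).map (fun y => -y)) := by
          rw [dropAll_coe dropped _ hdle', hmap1]
        have hmax : PySem.List.max? (dropAll (enemy.take (i + 1)) dropped) (fun y => y)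
            = some (-mv) := max_of_neg_min hpool.symm hmv
        rw [hpop, hmax]
        simp only [Option.getD_some]
        -- invariants for the recursive call at i + 1
        have hdrop' : (↑(dropped ++ [-mv]) : Multiset Int) ≤ ↑(enemy.take (i + 1)) := by
          rw [coe_append_single]
          have hnmv : (-mv) ∈ (↑(enemy.take (i + 1)) : Multiset Int) - ↑dropped := by
            rw [← hmap1]
            have : (-mv) ∈ (pyHeapPush h (-enemy[i])).map (fun y => -y) :=
              List.mem_map.mpr ⟨mv, hmvmem, rfl⟩
            simpa using this
          exact add_single_le hdle' hnmv
        have hh' : (↑(((pyHeapPush h (-enemy[i])).erase mv).map (fun y => -y)) : Multiset Int)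
            = ↑(enemy.take (i + 1)) - ↑(dropped ++ [-mv]) := by
          rw [List.map_erase (neg_injective : Function.Injective (fun y : Int => -y))]
          rw [← Multiset.coe_erase, hmap1]
          rw [← Multiset.sub_singleton, tsub_tsub, coe_append_single]
        have he' : e + enemy[i] - (-(mv)) = (enemy.take (i + 1)).sum - (dropped ++ [-mv]).sum := by
          rw [hsum, he, List.sum_append]
          simp only [List.sum_cons, List.sum_nil]
          ring
        have hkk : k - (dropped.length : Int) - 1 = k - ((dropped ++ [-mv]).length : Int) := by
          simp only [List.length_append, List.length_cons, List.length_nil]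
          push_cast
          ring
        rw [he', hkk]
        exact ih (i + 1) _ _ (dropped ++ [-mv]) (by omega) rfl hdrop' hh'
    · rw [if_neg hov, if_neg hov]
      have he' : e + enemy[i] = (enemy.take (i + 1)).sum - dropped.sum := by
        rw [hsum, he]; ring
      rw [he']
      exact ih (i + 1) _ _ dropped (by omega) rfl hdle' hmap1

-- ===== VERDICT (by name: the statement is the Claim_ definition above) =====
theorem solution_spec : Claim_equal_solution := by
  intro n k enemy _ _
  unfold Spec_solution solution solution_alt
  by_cases hk : k ≥ (enemy.length : Int)
  · rw [if_pos hk, if_pos hk]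
  · rw [if_neg hk, if_neg hk]
    have h0 : List.range enemy.length = List.range' 0 enemy.length := List.range_eq_range'
    rw [h0]
    have := loop_eq n k enemy enemy.length 0 0 [] [] (by omega) (by simp) (by simp) (by simp)
    simpa using this
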